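-- pv_equiv track=rewrite | github.com/lilmoon99/introducingToPython | Seminars/Урок 4. Словари, множества и профилирование/task3.py | Check
-- ===== SOURCE A (Python) =====
-- def Check(n: int) -> bool:
--     is_good = False
--     while n > 0:
--         if n % 10 == 0:
--             is_good = True
--             break
--         n = n // 10
--     return is_good
-- ===== SOURCE B (Python) =====
-- def Check(n: int) -> bool:
--     return n > 0 and '0' in str(n)
-- ===== Notes on version B (the rewrite author's own statement) =====
-- stated objective: idiomatic
-- what changed: Replaces the arithmetic digit-extraction loop with one conversion of n to its decimal string and a zero-digit substring membership test, guarded first by positivity so nonpositive inputs return False as in A.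
import Mathlib
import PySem

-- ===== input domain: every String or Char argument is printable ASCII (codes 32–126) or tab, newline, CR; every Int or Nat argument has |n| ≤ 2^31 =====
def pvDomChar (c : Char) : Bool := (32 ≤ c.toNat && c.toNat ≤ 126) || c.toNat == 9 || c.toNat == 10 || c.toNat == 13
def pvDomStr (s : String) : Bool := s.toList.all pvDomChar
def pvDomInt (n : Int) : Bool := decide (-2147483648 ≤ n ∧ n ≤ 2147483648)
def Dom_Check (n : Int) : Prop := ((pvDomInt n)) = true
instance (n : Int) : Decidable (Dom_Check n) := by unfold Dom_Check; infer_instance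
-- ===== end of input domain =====

-- B replaces A's %10 // 10 digit loop by one conversion to the decimal string and a
-- substring membership test '0' in str(n), guarded by n > 0 (idiomatic, same cost).

theorem pvFloordivLt (n : Int) (h : 0 < n) : (PySem.Int.floordiv n 10).toNat < n.toNat := by
  simp only [PySem.Int.floordiv]
  have h1 := Int.fdiv_eq_ediv (a := n) (b := 10)
  rw [if_pos (Or.inl (by norm_num))] at h1
  omega

-- ===== PORT A =====
def Check (n : Int) : Bool :=
  if 0 < n then
    if PySem.Int.mod n 10 == 0 then true
    else Check (PySem.Int.floordiv n 10)
  else false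
termination_by n.toNat
decreasing_by exact pvFloordivLt n (by assumption)

-- ===== PORT B =====
-- '0' in str(n) is PySem.Str.isIn "0" (PySem.Int.toStr n); 'and' short-circuits via &&.
def Check_alt (n : Int) : Bool :=
  decide (0 < n) && PySem.Str.isIn "0" (PySem.Int.toStr n)

-- ===== PRECONDITION & SPEC =====
def Spec_Check (n : Int) (out : Bool) : Prop := out = Check_alt n
instance (n : Int) (out : Bool) : Decidable (Spec_Check n out) := by unfold Spec_Check; infer_instance

-- ===== CLAIM (what is proved, stated in full; the proofs are below) =====
def Claim_equal_Check : Prop := ∀ (n : Int), Dom_Check n → Spec_Check n (Check n)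

-- ===== LEMMAS AND PROOFS =====

-- A's loop, restated over Nat (proof-only mirror of Check on nonnegative inputs).
def loopA (m : Nat) : Bool :=
  if 0 < m then
    if m % 10 = 0 then true else loopA (m / 10)
  else false
decreasing_by exact Nat.div_lt_self (by assumption) (by norm_num)

theorem check_eq_loopA (n : Int) : Check n = loopA n.toNat := by
  induction n using Check.induct with
  | case1 n hpos hmod =>
    rw [Check, loopA]
    have h0 : 0 < n.toNat := by omega
    have hm : n.toNat % 10 = 0 := by
      simp only [PySem.Int.mod, beq_iff_eq] at hmod
      have h1 := Int.fmod_eq_emod (a := n) (b := 10)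
      rw [if_pos (Or.inl (by norm_num))] at h1
      omega
    rw [if_pos hpos, if_pos hmod, if_pos h0, if_pos hm]
  | case2 n hpos hmod ih =>
    rw [Check, loopA]
    have h0 : 0 < n.toNat := by omega
    have hfd : Int.fmod n 10 = n % 10 := by
      have h1 := Int.fmod_eq_emod (a := n) (b := 10)
      rw [if_pos (Or.inl (by norm_num))] at h1
      simpa using h1
    have hm : ¬ n.toNat % 10 = 0 := by
      simp only [PySem.Int.mod, beq_iff_eq] at hmod
      rw [hfd] at hmod
      omega
    have hdiv : (PySem.Int.floordiv n 10).toNat = n.toNat / 10 := by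
      simp only [PySem.Int.floordiv]
      have h1 := Int.fdiv_eq_ediv (a := n) (b := 10)
      rw [if_pos (Or.inl (by norm_num))] at h1
      rw [h1]
      omega
    rw [if_pos hpos, if_neg hmod, if_pos h0, if_neg hm, ih, hdiv]
  | case3 n hpos =>
    rw [Check, loopA]
    have : ¬ 0 < n.toNat := by omega
    simp [hpos, this]

theorem digitChar_eq_zero_iff (d : Nat) (hd : d < 10) : ('0' = Nat.digitChar d) ↔ d = 0 := by
  interval_cases d <;> simp [Nat.digitChar]

theorem mem_toDigitsCore (fuel m : Nat) (ds : List Char) (hm : 0 < m) (hf : m < fuel) :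
    ('0' ∈ Nat.toDigitsCore 10 fuel m ds) ↔ ('0' ∈ ds ∨ loopA m = true) := by
  induction m using Nat.strong_induction_on generalizing fuel ds with
  | _ m ih =>
    match fuel with
    | 0 => omega
    | f + 1 =>
      rw [Nat.toDigitsCore]
      have hd : m % 10 < 10 := Nat.mod_lt _ (by norm_num)
      rw [loopA, if_pos hm]
      by_cases hq : m / 10 = 0
      · by_cases hz : m % 10 = 0
        · simp [hq, hz, Nat.digitChar]
        · simp only [hq]
          simp [hz, loopA]
          exact fun h => absurd ((digitChar_eq_zero_iff _ hd).mp h) hz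
      · rw [if_neg hq]
        have hlt : m / 10 < m := Nat.div_lt_self hm (by norm_num)
        have hfu : m / 10 < f := by
          have := Nat.div_le_self m 10
          omega
        rw [ih (m / 10) hlt f _ (Nat.pos_of_ne_zero hq) hfu]
        simp only [List.mem_cons, digitChar_eq_zero_iff _ hd]
        by_cases hz : m % 10 = 0
        · simp [hz]
        · simp [hz]

theorem singleton_infix_iff (a : Char) (l : List Char) : [a] <:+: l ↔ a ∈ l := by
  constructor
  · intro h
    exact h.subset (by simp)
  · intro h
    obtain ⟨s, t, rfl⟩ := List.append_of_mem h
    exact ⟨s, t, by simp⟩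

theorem loopA_eq_mem (m : Nat) (hm : 0 < m) :
    loopA m = decide ('0' ∈ Nat.toDigits 10 m) := by
  have h := mem_toDigitsCore (m + 1) m [] hm (by omega)
  rw [Nat.toDigits]
  by_cases hl : loopA m = true
  · rw [hl, eq_comm, decide_eq_true_iff]
    exact h.mpr (Or.inr hl)
  · rw [Bool.not_eq_true] at hl
    rw [hl, eq_comm, decide_eq_false_iff_not]
    intro hmem
    rcases h.mp hmem with h' | h' <;> simp_all

-- ===== VERDICT (by name: the statement is the Claim_ definition above) =====
theorem Check_spec : Claim_equal_Check := by
  intro n _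
  unfold Spec_Check Check_alt
  by_cases h : 0 < n
  · have h' : ¬ n < 0 := by omega
    rw [check_eq_loopA, loopA_eq_mem n.toNat (by omega)]
    simp only [h, decide_true, Bool.true_and]
    rw [PySem.Str.isIn, show ("0" : String).toList = ['0'] from rfl]
    rw [show (PySem.Int.toStr n).toList = PySem.Int.toChars n from PySem.Int.toList_toStr n]
    rw [PySem.Int.toChars, if_neg h']
    rw [show PySem.Chars.isIn ['0'] (Nat.toDigits 10 n.toNat) =
        decide (['0'] <:+: Nat.toDigits 10 n.toNat) from by
      by_cases hin : PySem.Chars.isIn ['0'] (Nat.toDigits 10 n.toNat) = true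
      · rw [hin, eq_comm, decide_eq_true_iff]
        exact (PySem.Chars.isIn_iff_infix _ _).mp hin
      · rw [Bool.not_eq_true] at hin
        rw [hin, eq_comm, decide_eq_false_iff_not]
        exact (PySem.Chars.isIn_eq_false_iff _ _).mp hin]
    simp [singleton_infix_iff]
  · rw [Check]
    simp [h]
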